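-- pv_equiv track=rewrite | github.com/F3dosik/PseudoRandomGenerator | Python/main.py | f
-- ===== SOURCE A (Python) =====
-- def f(block):
--     block = list(block)
--     t = len(block)
--     f_cur = 0
--
--     for r in range(t, 1, -1):
--         prefix = block[:r]
--         s = prefix.index(max(prefix))
--         f_cur = r * f_cur + s
--         block[r-1], block[s] = block[s], block[r-1]
--
--     return f_cur
-- ===== SOURCE B (Python) =====
-- def f(block):
--     # Segment tree keyed by (value, leftmost index): the leftmost argmax of the
--     # active prefix is read from the root in O(1) each round, and the two slot
--     # changes are O(log n) point updates -- no per-round linear scan.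
--     xs = list(block)
--     t = len(xs)
--     if t < 2:
--         return 0
--
--     def better(a, b):
--         if a is None:
--             return b
--         if b is None:
--             return a
--         return b if b[0] > a[0] else a
--
--     def build(lo, hi):
--         if hi - lo == 1:
--             return ((xs[lo], lo), None, None)
--         mid = (lo + hi) // 2
--         l = build(lo, mid)
--         r = build(mid, hi)
--         return (better(l[0], r[0]), l, r)
--
--     def update(node, lo, hi, pos, bst):
--         if hi - lo == 1:
--             return (bst, None, None)
--         mid = (lo + hi) // 2
--         _, l, r = node
--         if pos < mid:
--             l = update(l, lo, mid, pos, bst)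
--         else:
--             r = update(r, mid, hi, pos, bst)
--         return (better(l[0], r[0]), l, r)
--
--     tree = build(0, t)
--     f_cur = 0
--     for r in range(t, 1, -1):
--         s = tree[0][1]
--         f_cur = r * f_cur + s
--         v = xs[r - 1]
--         xs[s] = v
--         tree = update(tree, 0, t, s, (v, s))
--         tree = update(tree, 0, t, r - 1, None)
--     return f_cur
-- ===== Notes on version B (the rewrite author's own statement) =====
-- stated objective: faster
-- what changed: Replaces A's per-round linear scan of the prefix (slice + max + index) by a segment tree storing (max value, leftmost index): the digit is read from the root in O(1) and the two slot changes per round are O(log n) point updates (fill the hole with the last slot's value, deactivate the last slot).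
import Mathlib
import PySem

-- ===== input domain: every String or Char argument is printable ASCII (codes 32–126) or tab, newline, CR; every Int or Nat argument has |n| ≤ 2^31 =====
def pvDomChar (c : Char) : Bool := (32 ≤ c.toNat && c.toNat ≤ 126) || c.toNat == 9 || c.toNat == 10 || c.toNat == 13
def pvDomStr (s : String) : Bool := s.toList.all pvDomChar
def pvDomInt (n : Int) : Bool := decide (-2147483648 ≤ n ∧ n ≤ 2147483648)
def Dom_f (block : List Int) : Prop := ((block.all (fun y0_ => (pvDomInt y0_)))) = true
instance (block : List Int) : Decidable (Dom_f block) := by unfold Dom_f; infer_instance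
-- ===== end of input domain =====

-- B replaces A's per-round linear scan of the prefix (slice + max + index) by a segment
-- tree storing (max value, leftmost index): the digit is the root's index, and the two
-- slot changes per round are point updates (objective: faster, O(n log n) vs O(n^2)).

-- ===== PORT A =====
-- the for-loop of A: r runs t, t-1, ..., 2 (range(t, 1, -1)); state (block, f_cur)
def fLoopA : Nat → List Int → Int → Int
  | 0, _, acc => acc
  | 1, _, acc => acc
  | (r+2), bl, acc =>
      let n := r + 2
      let pfx := PySem.List.slice bl none (some (n : Int))   -- block[:r]
      let m := (PySem.List.max? pfx (fun y => y)).getD 0     -- max(prefix); prefix nonempty, so some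
      let s := (PySem.List.index? pfx m).getD 0              -- prefix.index(max(prefix)); m ∈ prefix, so some
      let acc' := (n : Int) * acc + (s : Int)
      -- block[r-1], block[s] = block[s], block[r-1]  (both indices in range, so List.set/getD are exact)
      let bl' := (bl.set (n-1) (bl.getD s 0)).set s (bl.getD (n-1) 0)
      fLoopA (r+1) bl' acc'

def f (block : List Int) : Int := fLoopA block.length block 0

-- ===== PORT B =====
-- B's trees are nested tuples (best, left, right) with best = None | (value, index);
-- indices in B are nonnegative Python ints throughout (and (lo+hi)//2 is on nonnegative
-- ints), so Nat arithmetic below is exact.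
inductive STree where
  | leaf : Option (Int × Nat) → STree
  | node : Option (Int × Nat) → STree → STree → STree

-- node[0] in Python: the stored best of a node
def bestOf : STree → Option (Int × Nat)
  | .leaf b => b
  | .node b _ _ => b

-- better(a, b): b if a is None; a if b is None; b if b[0] > a[0] else a
def fB_better (a b : Option (Int × Nat)) : Option (Int × Nat) :=
  match a, b with
  | none, b => b
  | a, none => a
  | some x, some y => if y.1 > x.1 then some y else some x

-- build(lo, hi); the Nat fuel (= hi - lo at the top call) only makes the recursion total
def fB_build (xs : List Int) : Nat → Nat → Nat → STree
  | 0, _, _ => .leaf none          -- unreachable: build is called with fuel ≥ hi - lo ≥ 1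
  | fuel+1, lo, hi =>
      if hi - lo == 1 then .leaf (some ((PySem.List.pyGet? xs (lo : Int)).getD 0, lo))  -- xs[lo]
      else
        let mid := (lo + hi) / 2
        let l := fB_build xs fuel lo mid
        let r := fB_build xs fuel mid hi
        .node (fB_better (bestOf l) (bestOf r)) l r

-- update(node, lo, hi, pos, bst); fuel as in build
def fB_update : Nat → STree → Nat → Nat → Nat → Option (Int × Nat) → STree
  | 0, tr, _, _, _, _ => tr        -- unreachable
  | fuel+1, tr, lo, hi, pos, bst =>
      if hi - lo == 1 then .leaf bst
      else
        match tr with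
        | .leaf b => .leaf b       -- unreachable: shape always matches (lo, hi)
        | .node _ l r =>
            let mid := (lo + hi) / 2
            if pos < mid then
              let l' := fB_update fuel l lo mid pos bst
              .node (fB_better (bestOf l') (bestOf r)) l' r
            else
              let r' := fB_update fuel r mid hi pos bst
              .node (fB_better (bestOf l) (bestOf r')) l r'

-- the for-loop of B: r runs t, t-1, ..., 2; state (xs, tree, f_cur)
def fB_loop (t : Nat) : Nat → List Int → STree → Int → Int
  | 0, _, _, acc => acc
  | 1, _, _, acc => acc
  | (r+2), xs, tree, acc =>
      let n := r + 2
      let s := ((bestOf tree).getD (0, 0)).2                 -- tree[0][1]; root best is never None here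
      let acc' := (n : Int) * acc + (s : Int)
      let v := (PySem.List.pyGet? xs ((n : Int) - 1)).getD 0 -- v = xs[r-1]
      let xs' := xs.set s v                                  -- xs[s] = v
      let tree1 := fB_update t tree 0 t s (some (v, s))
      let tree2 := fB_update t tree1 0 t (n-1) none
      fB_loop t (r+1) xs' tree2 acc'

def f_alt (block : List Int) : Int :=
  let t := block.length
  if t < 2 then 0
  else fB_loop t t block (fB_build block t 0 t) 0

-- ===== PRECONDITION & SPEC =====
def Spec_f (block : List Int) (out : Int) : Prop := out = f_alt block
instance (block : List Int) (out : Int) : Decidable (Spec_f block out) := by unfold Spec_f; infer_instance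

-- ===== CLAIM (what is proved, stated in full; the proofs are below) =====
def Claim_equal_f : Prop := ∀ (block : List Int), Dom_f block → Spec_f block (f block)

-- ===== LEMMAS AND PROOFS =====

-- canonical tree of the option-array v over [lo, lo+len): the shape build/update maintain
def specT (v : List (Option Int)) (lo len : Nat) : STree :=
  if len ≤ 1 then .leaf ((v.getD lo none).map (fun x => (x, lo)))
  else
    .node (fB_better (bestOf (specT v lo (len/2))) (bestOf (specT v (lo+len/2) (len - len/2))))
      (specT v lo (len/2)) (specT v (lo+len/2) (len - len/2))
termination_by len
decreasing_by all_goals omega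

-- fold of fB_better over the entries of v on [lo, lo+len)
def rb (v : List (Option Int)) (lo len : Nat) : Option (Int × Nat) :=
  ((List.range' lo len).map (fun i => (v.getD i none).map (fun x => (x, i)))).foldl fB_better none

theorem bestOf_leaf (b : Option (Int × Nat)) : bestOf (.leaf b) = b := rfl
theorem bestOf_node (b : Option (Int × Nat)) (l r : STree) : bestOf (.node b l r) = b := rfl

theorem better_none_right (a : Option (Int × Nat)) : fB_better a none = a := by
  cases a <;> rfl

theorem better_assoc (a b c : Option (Int × Nat)) :
    fB_better (fB_better a b) c = fB_better a (fB_better b c) := by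
  cases a <;> cases b <;> cases c <;> try rfl
  case some.some.none x y => rw [better_none_right, better_none_right]
  case some.some.some x y z =>
    simp only [fB_better]
    by_cases h1 : y.1 > x.1 <;> by_cases h2 : z.1 > y.1 <;>
      simp only [h1, h2, if_true, if_false] <;>
      split_ifs <;> first | rfl | (exfalso; omega)

theorem foldl_better_shift (L : List (Option (Int × Nat))) :
    ∀ a, L.foldl fB_better a = fB_better a (L.foldl fB_better none) := by
  induction L with
  | nil => intro a; simp [better_none_right]
  | cons x L ih =>
      intro a
      simp only [List.foldl_cons]
      rw [ih (fB_better a x), ih (fB_better none x), ← better_assoc]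
      rfl

theorem rb_append (v : List (Option Int)) (lo m k : Nat) :
    rb v lo (m + k) = fB_better (rb v lo m) (rb v (lo + m) k) := by
  unfold rb
  rw [← List.range'_append_1, List.map_append, List.foldl_append, foldl_better_shift]

theorem rb_one (v : List (Option Int)) (lo : Nat) :
    rb v lo 1 = (v.getD lo none).map (fun x => (x, lo)) := by
  simp only [rb, List.range', List.map_cons, List.map_nil, List.foldl_cons, List.foldl_nil]
  rfl

theorem bestOf_specT (v : List (Option Int)) :
    ∀ len, 1 ≤ len → ∀ lo, bestOf (specT v lo len) = rb v lo len := by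
  intro len
  induction len using Nat.strong_induction_on with
  | _ len ih =>
    intro hlen lo
    conv_lhs => rw [specT]
    by_cases h : len ≤ 1
    · have h1 : len = 1 := by omega
      subst h1
      rw [if_pos h, bestOf_leaf, rb_one]
    · rw [if_neg h, bestOf_node]
      rw [ih (len/2) (by omega) (by omega) lo,
          ih (len - len/2) (by omega) (by omega) (lo + len/2)]
      have : len = len/2 + (len - len/2) := by omega
      conv_rhs => rw [this, rb_append]

-- specT depends only on the entries of v in [lo, lo+len)
theorem spec_congr (v w : List (Option Int)) :
    ∀ len lo, 1 ≤ len → (∀ i, lo ≤ i → i < lo + len → v.getD i none = w.getD i none) →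
    specT v lo len = specT w lo len := by
  intro len
  induction len using Nat.strong_induction_on with
  | _ len ih =>
    intro lo hlen hvw
    conv_lhs => rw [specT]
    conv_rhs => rw [specT]
    by_cases h : len ≤ 1
    · simp only [if_pos h]
      rw [hvw lo (le_refl _) (by omega)]
    · simp only [if_neg h]
      have hl := ih (len/2) (by omega) lo (by omega) (fun i h1 h2 => hvw i h1 (by omega))
      have hr := ih (len - len/2) (by omega) (lo + len/2) (by omega)
        (fun i h1 h2 => hvw i (by omega) (by omega))
      rw [hl, hr]

theorem build_eq_spec (xs : List Int) :
    ∀ fuel len lo, 1 ≤ len → len ≤ fuel → lo + len ≤ xs.length →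
    fB_build xs fuel lo (lo + len) = specT (xs.map some) lo len := by
  intro fuel
  induction fuel with
  | zero => intro len lo h1 h2 h3; omega
  | succ fuel ih =>
    intro len lo h1 h2 h3
    rw [fB_build]
    conv_rhs => rw [specT]
    by_cases hl : len = 1
    · subst hl
      have hc : (lo + 1 - lo == 1) = true := by simp
      simp only [hc, if_pos, if_pos (by omega : (1:Nat) ≤ 1)]
      have hlt : lo < xs.length := by omega
      have hget : PySem.List.pyGet? xs (lo : Int) = some xs[lo] := by
        rw [PySem.List.pyGet?_natCast]
        exact List.getElem?_eq_getElem hlt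
      rw [hget]
      have : (xs.map some).getD lo none = some xs[lo] := by
        simp [List.getD_eq_getElem?_getD, List.getElem?_map, List.getElem?_eq_getElem hlt]
      rw [this]
      simp
    · have hlen2 : 2 ≤ len := by omega
      have hc : (lo + len - lo == 1) = false := by simp; omega
      simp only [hc, Bool.false_eq_true, if_neg (by omega : ¬ len ≤ 1)]
      have hmid : (lo + (lo + len)) / 2 = lo + len/2 := by omega
      rw [hmid]
      have hleft : fB_build xs fuel lo (lo + len/2) = specT (xs.map some) lo (len/2) :=
        ih (len/2) lo (by omega) (by omega) (by omega)
      have hright : fB_build xs fuel (lo + len/2) (lo + len) = specT (xs.map some) (lo + len/2) (len - len/2) := by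
        have : lo + len = (lo + len/2) + (len - len/2) := by omega
        rw [this]
        exact ih (len - len/2) (lo + len/2) (by omega) (by omega) (by omega)
      rw [hleft, hright]
      simp

theorem update_eq_spec :
    ∀ fuel (v : List (Option Int)) len lo pos (w : Option Int),
    1 ≤ len → len ≤ fuel → lo ≤ pos → pos < lo + len → lo + len ≤ v.length →
    fB_update fuel (specT v lo len) lo (lo + len) pos (w.map (fun x => (x, pos)))
      = specT (v.set pos w) lo len := by
  intro fuel
  induction fuel with
  | zero => intro v len lo pos w h1 h2; omega
  | succ fuel ih =>
    intro v len lo pos w h1 h2 h3 h4 h5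
    by_cases hl : len = 1
    · subst hl
      have hpos : pos = lo := by omega
      conv_lhs => rw [specT]
      conv_rhs => rw [specT]
      rw [if_pos (le_refl 1), if_pos (le_refl 1), fB_update.eq_2]
      have hc : (lo + 1 - lo == 1) = true := by simp
      rw [if_pos hc, hpos]
      have : (v.set lo w).getD lo none = w := by
        simp [List.getD_eq_getElem?_getD, List.getElem?_set_self (by omega : lo < v.length)]
      rw [this]
    · have hlen2 : 2 ≤ len := by omega
      conv_lhs => rw [specT]
      conv_rhs => rw [specT]
      rw [if_neg (by omega : ¬ len ≤ 1), if_neg (by omega : ¬ len ≤ 1), fB_update.eq_3]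
      have hc : ¬ ((lo + len - lo == 1) = true) := by simp; omega
      rw [if_neg hc]
      have hmid : (lo + (lo + len)) / 2 = lo + len/2 := by omega
      rw [hmid]
      by_cases hp : pos < lo + len/2
      · rw [if_pos hp]
        have hrec : fB_update fuel (specT v lo (len/2)) lo (lo + len/2) pos (w.map (fun x => (x, pos)))
            = specT (v.set pos w) lo (len/2) :=
          ih v (len/2) lo pos w (by omega) (by omega) h3 hp (by omega)
        have hother : specT v (lo + len/2) (len - len/2) = specT (v.set pos w) (lo + len/2) (len - len/2) := by
          apply spec_congr _ _ _ _ (by omega)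
          intro i hi1 hi2
          have : pos ≠ i := by omega
          simp [List.getD_eq_getElem?_getD, List.getElem?_set_ne this]
        rw [hrec, hother]
      · rw [if_neg hp]
        have hrw : lo + len = (lo + len/2) + (len - len/2) := by omega
        have hrec : fB_update fuel (specT v (lo + len/2) (len - len/2)) (lo + len/2) (lo + len) pos (w.map (fun x => (x, pos)))
            = specT (v.set pos w) (lo + len/2) (len - len/2) := by
          rw [hrw]
          exact ih v (len - len/2) (lo + len/2) pos w (by omega) (by omega) (by omega) (by omega) (by omega)
        have hother : specT v lo (len/2) = specT (v.set pos w) lo (len/2) := by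
          apply spec_congr _ _ _ _ (by omega)
          intro i hi1 hi2
          have : pos ≠ i := by omega
          simp [List.getD_eq_getElem?_getD, List.getElem?_set_ne this]
        rw [hrec, hother]

-- the leaf contents of B's tree during round r: xs[i] for i < r, inactive above
def mask (t : Nat) (xs : List Int) (r : Nat) : List (Option Int) :=
  (xs.take r).map some ++ List.replicate (t - r) none

theorem mask_length (t : Nat) (xs : List Int) (r : Nat) (h1 : r ≤ t) (h2 : t = xs.length) :
    (mask t xs r).length = t := by
  simp [mask]
  omega

theorem mask_getD_lt (t : Nat) (xs : List Int) (r i : Nat) (h1 : r ≤ t) (h2 : t = xs.length)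
    (hi : i < r) : (mask t xs r).getD i none = some (xs.getD i 0) := by
  have hlen : ((xs.take r).map some).length = r := by simp; omega
  have hlt : i < xs.length := by omega
  rw [mask, List.getD_eq_getElem?_getD, List.getElem?_append_left (by omega),
      List.getElem?_map, List.getElem?_take]
  simp [hi, List.getElem?_eq_getElem hlt, List.getD_eq_getElem?_getD]

theorem mask_getD_ge (t : Nat) (xs : List Int) (r i : Nat) (h1 : r ≤ t) (h2 : t = xs.length)
    (hi : r ≤ i) : (mask t xs r).getD i none = none := by
  have hlen : ((xs.take r).map some).length = r := by simp; omega
  rw [mask, List.getD_eq_getElem?_getD, List.getElem?_append_right (by omega), hlen,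
      List.getElem?_replicate]
  by_cases hit : i - r < t - r
  · rw [if_pos hit]
    rfl
  · rw [if_neg hit]
    rfl

theorem rb_nones (v : List (Option Int)) :
    ∀ len lo, (∀ i, lo ≤ i → i < lo + len → v.getD i none = none) → rb v lo len = none := by
  intro len
  induction len with
  | zero => intro lo h; simp [rb]
  | succ len ih =>
      intro lo h
      have : len + 1 = 1 + len := by omega
      rw [this, rb_append, rb_one, h lo (by omega) (by omega)]
      simp only [Option.map_none]
      rw [ih (lo+1) (fun i h1 h2 => h i (by omega) (by omega))]
      rfl

-- "b is the leftmost-argmax state of p" (b = (index, value))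
def GS (p : List Int) (b : Int × Int) : Prop :=
  0 ≤ b.1 ∧ b.1.toNat < p.length ∧ p.getD b.1.toNat 0 = b.2 ∧
  (∀ q, q < p.length → p.getD q 0 ≤ b.2) ∧ (∀ q, q < b.1.toNat → p.getD q 0 < b.2)

theorem gs_unique {p : List Int} {b1 b2 : Int × Int} (h1 : GS p b1) (h2 : GS p b2) :
    b1.1 = b2.1 := by
  obtain ⟨h1a, h1b, h1c, h1d, h1e⟩ := h1
  obtain ⟨h2a, h2b, h2c, h2d, h2e⟩ := h2
  rcases lt_trichotomy b1.1 b2.1 with h | h | h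
  · exfalso
    have ht : b1.1.toNat < b2.1.toNat := by omega
    have hlt := h2e _ ht
    have hle := h1d b2.1.toNat h2b
    rw [h1c] at hlt
    rw [h2c] at hle
    linarith
  · exact h
  · exfalso
    have ht : b2.1.toNat < b1.1.toNat := by omega
    have hlt := h1e _ ht
    have hle := h2d b1.1.toNat h1b
    rw [h2c] at hlt
    rw [h1c] at hle
    linarith

-- A's selection (max + leftmost index) satisfies GS
theorem aSel_gs (xs : List Int) (hne : xs ≠ []) :
    GS xs (((PySem.List.index? xs ((PySem.List.max? xs (fun y => y)).getD 0)).getD 0 : Nat),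
           (PySem.List.max? xs (fun y => y)).getD 0) := by
  obtain ⟨m, hm⟩ : ∃ m, PySem.List.max? xs (fun y => y) = some m := by
    cases hmx : PySem.List.max? xs (fun y => y) with
    | none => exact absurd ((PySem.List.max?_eq_none_iff xs (fun y => y)).mp hmx) hne
    | some m => exact ⟨m, rfl⟩
  have hmem : m ∈ xs := PySem.List.max?_mem hm
  have hub : ∀ y ∈ xs, y ≤ m := fun y hy => PySem.List.max?_isMax hm y hy
  obtain ⟨k, hk⟩ : ∃ k, PySem.List.index? xs m = some k := by
    have hs := (PySem.List.index?_isSome_iff xs m).mpr hmem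
    exact Option.isSome_iff_exists.mp hs
  obtain ⟨hklen, hkval, hbefore⟩ := PySem.List.getElem_of_index?_eq_some hk
  rw [hm]
  simp only [Option.getD_some]
  rw [hk]
  simp only [Option.getD_some]
  refine ⟨Int.natCast_nonneg k, by simpa using hklen, ?_, ?_, ?_⟩
  · simp only [Int.toNat_natCast]
    rw [List.getD_eq_getElem _ _ hklen]
    exact hkval
  · intro q hq
    rw [List.getD_eq_getElem _ _ hq]
    exact hub _ (List.getElem_mem hq)
  · intro q hq
    simp only [Int.toNat_natCast] at hq
    have hqlen : q < xs.length := lt_trans hq hklen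
    rw [List.getD_eq_getElem _ _ hqlen]
    exact lt_of_le_of_ne (hub _ (List.getElem_mem hqlen)) (hbefore q hq)

theorem take_getD' (xs : List Int) (r q : Nat) (hq : q < r) (hr : r ≤ xs.length) :
    (xs.take r).getD q 0 = xs.getD q 0 := by
  rw [List.getD_eq_getElem _ _ (by simp; omega), List.getD_eq_getElem _ _ (by omega)]
  simp [List.getElem_take]

-- the root fold over the active entries satisfies GS
theorem rb_gs (xs : List Int) (v : List (Option Int)) :
    ∀ r, 1 ≤ r → r ≤ xs.length → (∀ i, i < r → v.getD i none = some (xs.getD i 0)) →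
    ∃ m i, rb v 0 r = some (m, i) ∧ GS (xs.take r) ((i : Int), m) := by
  intro r
  induction r with
  | zero => intro h; omega
  | succ r ih =>
    intro _ hr hv
    by_cases hr1 : r = 0
    · subst hr1
      refine ⟨xs.getD 0 0, 0, ?_, ?_⟩
      · rw [rb_one, hv 0 (by omega)]
        rfl
      · refine ⟨le_refl _, by simp; omega, ?_, ?_, ?_⟩
        · exact take_getD' xs 1 0 (by omega) (by omega)
        · intro q hq
          simp only [List.length_take] at hq
          have : q = 0 := by omega
          subst this
          rw [take_getD' xs 1 0 (by omega) (by omega)]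
        · intro q hq
          exact absurd hq (by omega)
    · have h1r : 1 ≤ r := by omega
      obtain ⟨m, i, hrb, hgs⟩ := ih h1r (by omega) (fun i hi => hv i (by omega))
      have hsplit : rb v 0 (r + 1) = fB_better (rb v 0 r) (rb v r 1) := by
        have h0 : (0:Nat) + r = r := by omega
        rw [rb_append v 0 r 1, h0]
      rw [hsplit, hrb, rb_one, hv r (by omega)]
      obtain ⟨hga, hgb, hgc, hgd, hge⟩ := hgs
      have hlen_r : (xs.take r).length = r := by simp; omega
      have hlen_r1 : (xs.take (r+1)).length = r + 1 := by simp; omega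
      by_cases hgt : xs.getD r 0 > m
      · refine ⟨xs.getD r 0, r, ?_, ?_⟩
        · show fB_better (some (m, i)) (some (xs.getD r 0, r)) = some (xs.getD r 0, r)
          have hred : fB_better (some (m, i)) (some (xs.getD r 0, r))
              = if xs.getD r 0 > m then some (xs.getD r 0, r) else some (m, i) := rfl
          rw [hred, if_pos hgt]
        · refine ⟨by positivity, by simp [hlen_r1], ?_, ?_, ?_⟩
          · simp only [Int.toNat_natCast]
            exact take_getD' xs (r+1) r (by omega) hr
          · intro q hq
            rw [hlen_r1] at hq
            rw [take_getD' xs (r+1) q hq hr]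
            by_cases hqr : q < r
            · have := hgd q (by omega)
              rw [take_getD' xs r q hqr (by omega)] at this
              omega
            · have : q = r := by omega
              subst this
              omega
          · intro q hq
            simp only [Int.toNat_natCast] at hq
            rw [take_getD' xs (r+1) q (by omega) hr]
            have := hgd q (by omega)
            rw [take_getD' xs r q hq (by omega)] at this
            omega
      · refine ⟨m, i, ?_, ?_⟩
        · show fB_better (some (m, i)) (some (xs.getD r 0, r)) = some (m, i)
          have hred : fB_better (some (m, i)) (some (xs.getD r 0, r))
              = if xs.getD r 0 > m then some (xs.getD r 0, r) else some (m, i) := rfl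
          rw [hred, if_neg hgt]
        · have hitoNat : ((i : Int)).toNat = i := Int.toNat_natCast i
          refine ⟨by positivity, ?_, ?_, ?_, ?_⟩
          · rw [hitoNat, hlen_r1]
            rw [hitoNat, hlen_r] at hgb
            omega
          · rw [hitoNat]
            rw [hitoNat] at hgb hgc
            rw [hlen_r] at hgb
            rw [take_getD' xs (r+1) i (by omega) hr]
            rw [take_getD' xs r i (by omega) (by omega)] at hgc
            exact hgc
          · intro q hq
            rw [hlen_r1] at hq
            rw [take_getD' xs (r+1) q hq hr]
            by_cases hqr : q < r
            · have := hgd q (by rw [hlen_r]; omega)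
              rw [take_getD' xs r q hqr (by omega)] at this
              exact this
            · have : q = r := by omega
              subst this
              omega
          · intro q hq
            rw [hitoNat] at hq
            rw [hitoNat, hlen_r] at hgb
            rw [take_getD' xs (r+1) q (by omega) hr]
            have := hge q (by rw [hitoNat]; omega)
            rw [take_getD' xs r q (by omega) (by omega)] at this
            exact this

-- the swap in A and the overwrite in B agree on the surviving prefix
theorem swap_take_eq (bl xs : List Int) (n s : Nat) (hn : n ≤ bl.length)
    (hlen : bl.length = xs.length) (hs : s < n) (h1 : 1 ≤ n)
    (htk : bl.take n = xs.take n) :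
    ((bl.set (n-1) (bl.getD s 0)).set s (bl.getD (n-1) 0)).take (n-1)
      = (xs.set s (xs.getD (n-1) 0)).take (n-1) := by
  have hval : ∀ q, q < n → bl.getD q 0 = xs.getD q 0 := by
    intro q hq
    have h1' := take_getD' bl n q hq hn
    have h2' := take_getD' xs n q hq (by omega)
    rw [← h1', ← h2', htk]
  apply List.ext_getElem
  · simp
    omega
  · intro q hq1 hq2
    simp only [List.length_take, List.length_set] at hq1 hq2
    have hqn : q < n - 1 := by omega
    have hqlen : q < bl.length := by omega
    rw [List.getElem_take, List.getElem_take, List.getElem_set, List.getElem_set, List.getElem_set]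
    by_cases hsq : s = q
    · subst hsq
      rw [if_pos rfl, if_pos rfl]
      exact hval (n-1) (by omega)
    · simp only [if_neg hsq]
      have hn1q : ¬ (n - 1 = q) := by omega
      simp only [if_neg hn1q]
      have := hval q (by omega)
      rw [List.getD_eq_getElem _ _ hqlen, List.getD_eq_getElem _ _ (by omega : q < xs.length)] at this
      exact this

-- one round of leaf bookkeeping: set s := v, deactivate slot n-1
theorem mask_step (t : Nat) (xs : List Int) (r s : Nat) (v : Int)
    (h2 : t = xs.length) (hrt : r + 2 ≤ t) (hs : s < r + 2) :
    ∀ i, i < t → (((mask t xs (r+2)).set s (some v)).set (r+1) none).getD i none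
      = (mask t (xs.set s v) (r+1)).getD i none := by
  intro i hit
  have hlen : (mask t xs (r+2)).length = t := mask_length t xs (r+2) hrt h2
  have hlen1 : ((mask t xs (r+2)).set s (some v)).length = t := by simp [hlen]
  have hxl : t = (xs.set s v).length := by simp [← h2]
  rw [List.getD_eq_getElem?_getD, List.getElem?_set, List.getElem?_set]
  by_cases hi1 : r + 1 = i
  · rw [if_pos hi1, if_pos (by omega : r + 1 < ((mask t xs (r+2)).set s (some v)).length),
        mask_getD_ge t (xs.set s v) (r+1) i (by omega) hxl (by omega)]
    rfl
  · rw [if_neg hi1]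
    by_cases hi2 : s = i
    · rw [if_pos hi2, if_pos (by omega : s < (mask t xs (r+2)).length),
          mask_getD_lt t (xs.set s v) (r+1) i (by omega) hxl (by omega)]
      have hv : (xs.set s v).getD i 0 = v := by
        rw [List.getD_eq_getElem?_getD, ← hi2,
            List.getElem?_set_self (by omega : s < xs.length)]
        rfl
      rw [hv]
      rfl
    · rw [if_neg hi2, ← List.getD_eq_getElem?_getD]
      by_cases hir : i < r + 1
      · rw [mask_getD_lt t xs (r+2) i hrt h2 (by omega),
            mask_getD_lt t (xs.set s v) (r+1) i (by omega) hxl hir]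
        have : (xs.set s v).getD i 0 = xs.getD i 0 := by
          rw [List.getD_eq_getElem?_getD, List.getElem?_set_ne hi2, ← List.getD_eq_getElem?_getD]
        rw [this]
      · rw [mask_getD_ge t xs (r+2) i hrt h2 (by omega),
            mask_getD_ge t (xs.set s v) (r+1) i (by omega) hxl (by omega)]

theorem loop_eq (t : Nat) :
    ∀ (r : Nat) (bl xs : List Int) (acc : Int),
    bl.length = t → xs.length = t → r ≤ t → bl.take r = xs.take r →
    fLoopA r bl acc = fB_loop t r xs (specT (mask t xs r) 0 t) acc
  | 0, bl, xs, acc, _, _, _, _ => by rw [fLoopA, fB_loop]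
  | 1, bl, xs, acc, _, _, _, _ => by rw [fLoopA, fB_loop]
  | (r+2), bl, xs, acc, hbl, hxs, hrt, htk => by
      have ht2 : 2 ≤ t := by omega
      have h2 : t = xs.length := hxs.symm
      -- A's selected index
      have hpne : bl.take (r+2) ≠ [] := by
        have : (bl.take (r+2)).length = r + 2 := by simp; omega
        intro hc; rw [hc] at this; simp at this
      have hgsA := aSel_gs (bl.take (r+2)) hpne
      set sN := (PySem.List.index? (bl.take (r+2))
          ((PySem.List.max? (bl.take (r+2)) (fun y => y)).getD 0)).getD 0 with hsN
      -- B's root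
      obtain ⟨m, i0, hrb, hgsB⟩ := rb_gs xs (mask t xs (r+2)) (r+2) (by omega) (by omega)
          (fun i hi => mask_getD_lt t xs (r+2) i hrt h2 hi)
      have hroot : bestOf (specT (mask t xs (r+2)) 0 t) = some (m, i0) := by
        rw [bestOf_specT _ t (by omega) 0]
        have hsplit := rb_append (mask t xs (r+2)) 0 (r+2) (t - (r+2))
        have hT : (r+2) + (t - (r+2)) = t := by omega
        rw [hT] at hsplit
        rw [hsplit, rb_nones (mask t xs (r+2)) (t - (r+2)) (0 + (r+2))
              (fun i hi1 hi2 => mask_getD_ge t xs (r+2) i hrt h2 (by omega)),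
            better_none_right]
        exact hrb
      -- the two indices agree
      have htkeq : bl.take (r+2) = xs.take (r+2) := htk
      have hseq : sN = i0 := by
        rw [htkeq] at hgsA
        have := gs_unique hgsA hgsB
        simpa using this
      -- unfold A one step
      have hslice : PySem.List.slice bl none (some ((r+2 : Nat) : Int)) = bl.take (r+2) :=
        PySem.List.slice_to_natCast bl (r+2)
      have hA : fLoopA (r+2) bl acc
          = fLoopA (r+1) ((bl.set (r+1) (bl.getD sN 0)).set sN (bl.getD (r+1) 0))
              (((r+2 : Nat) : Int) * acc + (sN : Int)) := by
        simp only [fLoopA, hslice, ← hsN]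
        norm_num
      -- unfold B one step
      have hvB : (PySem.List.pyGet? xs (((r+2 : Nat) : Int) - 1)).getD 0 = xs.getD (r+1) 0 := by
        have hc : ((r+2 : Nat) : Int) - 1 = ((r+1 : Nat) : Int) := by push_cast; ring
        rw [hc, PySem.List.pyGet?_natCast]
        rw [List.getElem?_eq_getElem (by omega : r+1 < xs.length)]
        rw [List.getD_eq_getElem _ _ (by omega : r+1 < xs.length)]
        rfl
      have hsN_lt : sN < r + 2 := by
        have := hgsB.2.1
        simp only [Int.toNat_natCast] at this
        simp only [List.length_take] at this
        omega
      have hmaskLen : 0 + t ≤ (mask t xs (r+2)).length := by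
        rw [mask_length t xs (r+2) hrt h2]
        omega
      set v := xs.getD (r+1) 0 with hv
      have hup1 : fB_update t (specT (mask t xs (r+2)) 0 t) 0 t i0 (some (v, i0))
          = specT ((mask t xs (r+2)).set i0 (some v)) 0 t := by
        have := update_eq_spec t (mask t xs (r+2)) t 0 i0 (some v) (by omega) (le_refl t)
          (by omega) (by omega) hmaskLen
        simpa using this
      have hup2 : fB_update t (specT ((mask t xs (r+2)).set i0 (some v)) 0 t) 0 t (r+1)
            (none : Option (Int × Nat))
          = specT (((mask t xs (r+2)).set i0 (some v)).set (r+1) none) 0 t := by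
        have hlen2 : 0 + t ≤ ((mask t xs (r+2)).set i0 (some v)).length := by
          simpa using hmaskLen
        have := update_eq_spec t ((mask t xs (r+2)).set i0 (some v)) t 0 (r+1) (none : Option Int)
          (by omega) (le_refl t) (by omega) (by omega) hlen2
        simpa using this
      have hmk : specT (((mask t xs (r+2)).set i0 (some v)).set (r+1) none) 0 t
          = specT (mask t (xs.set i0 v) (r+1)) 0 t := by
        apply spec_congr _ _ _ _ (by omega)
        intro i hi1 hi2
        exact mask_step t xs r i0 v h2 hrt (by omega) i (by omega)
      have hB : fB_loop t (r+2) xs (specT (mask t xs (r+2)) 0 t) acc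
          = fB_loop t (r+1) (xs.set i0 v) (specT (mask t (xs.set i0 v) (r+1)) 0 t)
              (((r+2 : Nat) : Int) * acc + (i0 : Int)) := by
        rw [fB_loop]
        simp only [hroot, Option.getD_some, hvB]
        rw [show r + 2 - 1 = r + 1 from by omega]
        rw [hup1, hup2, hmk]
      -- recurse
      have hvv : bl.getD (r+1) 0 = v := by
        rw [hv]
        have h1' := take_getD' bl (r+2) (r+1) (by omega) (by omega)
        have h2' := take_getD' xs (r+2) (r+1) (by omega) (by omega)
        rw [← h1', ← h2', htkeq]
      have hi0_lt : i0 < r + 2 := by omega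
      have htake' : ((bl.set (r+1) (bl.getD i0 0)).set i0 (bl.getD (r+1) 0)).take (r+1)
          = (xs.set i0 v).take (r+1) := by
        have hst := swap_take_eq bl xs (r+2) i0 (by omega) (by omega) hi0_lt (by omega) htkeq
        rw [show r + 2 - 1 = r + 1 from by omega] at hst
        rw [← hv] at hst
        exact hst
      have hih := loop_eq t (r+1)
          ((bl.set (r+1) (bl.getD i0 0)).set i0 (bl.getD (r+1) 0))
          (xs.set i0 v)
          (((r+2 : Nat) : Int) * acc + (i0 : Int))
          (by simp [hbl]) (by simp [hxs]) (by omega) htake'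
      rw [hA, hseq, hB]
      exact hih

-- ===== VERDICT (by name: the statement is the Claim_ definition above) =====
theorem f_spec : Claim_equal_f := by
  intro block _hd
  show f block = f_alt block
  by_cases ht : block.length < 2
  · have : fLoopA block.length block 0 = 0 := by
      interval_cases h : block.length <;> rw [fLoopA]
    rw [f, f_alt, this]
    simp [ht]
  · have ht2 : 2 ≤ block.length := by omega
    rw [f, f_alt]
    simp only [if_neg ht]
    have hbuild : fB_build block block.length 0 block.length
        = specT (block.map some) 0 block.length := by
      have := build_eq_spec block block.length block.length 0 (by omega) (le_refl _) (by omega)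
      simpa using this
    have hmask : mask block.length block block.length = block.map some := by
      simp [mask]
    rw [hbuild, ← hmask]
    exact loop_eq block.length block.length block block 0 rfl rfl (le_refl _) rfl
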